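-- pv_equiv track=rewrite | github.com/opengeospatial/bblocks-postprocess | ogc/bblocks/transformers/python.py | _strip_harness_frames
-- ===== SOURCE A (Python) =====
-- def _strip_harness_frames(stderr: str, harness_path: str) -> str:
--     lines = stderr.splitlines(keepends=True)
--     result = []
--     skip_next = False
--     for line in lines:
--         if skip_next:
--             skip_next = False
--             continue
--         if f'File "{harness_path}"' in line:
--             skip_next = True
--             continue
--         result.append(line)
--     return ''.join(result)
-- ===== SOURCE B (Python) =====
-- def _strip_harness_frames(stderr: str, harness_path: str) -> str:
--     marker = f'File "{harness_path}"'
--     lines = stderr.splitlines(keepends=True)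
--     out = []
--     while True:
--         idx = next((i for i, l in enumerate(lines) if marker in l), None)
--         if idx is None:
--             out.extend(lines)
--             return ''.join(out)
--         out.extend(lines[:idx])
--         lines = lines[idx + 2:]
-- ===== Notes on version B (the rewrite author's own statement) =====
-- stated objective: alternative
-- what changed: Replaces A's per-line state machine (skip_next flag carried across iterations) with a search-and-splice loop: repeatedly find the next harness-marker line, emit the clean prefix before it in one slice, and cut the marker plus its following line away by slicing.
import Mathlib
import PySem

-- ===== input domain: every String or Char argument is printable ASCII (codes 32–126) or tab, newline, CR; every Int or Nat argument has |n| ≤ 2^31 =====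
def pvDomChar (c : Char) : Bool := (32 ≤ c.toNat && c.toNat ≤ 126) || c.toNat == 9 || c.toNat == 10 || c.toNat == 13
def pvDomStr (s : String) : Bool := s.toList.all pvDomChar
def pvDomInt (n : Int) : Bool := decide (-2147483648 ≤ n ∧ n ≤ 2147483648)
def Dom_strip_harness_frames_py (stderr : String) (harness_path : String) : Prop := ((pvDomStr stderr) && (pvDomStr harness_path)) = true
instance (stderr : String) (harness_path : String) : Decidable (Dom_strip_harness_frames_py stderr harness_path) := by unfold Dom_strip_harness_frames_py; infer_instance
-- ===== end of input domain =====

-- B replaces A's per-line state machine (a skip_next flag carried across iterations) with a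
-- search-and-splice loop: find the next marker line, emit the clean prefix, cut marker + one
-- following line by slicing (objective: alternative decomposition, same cost).

-- Shared helper: exact hand port of str.splitlines(keepends=True) on the ASCII domain
-- (line breaks are '\n', '\r' and "\r\n"; the other Unicode breaks cannot occur inside Dom).
def pySplitlinesKeep : List Char → List (List Char)
  | [] => []
  | c :: rest =>
    if c = '\n' then [c] :: pySplitlinesKeep rest
    else if c = '\r' then
      match rest with
      | '\n' :: rest' => ['\r', '\n'] :: pySplitlinesKeep rest'
      | rest2 => [c] :: pySplitlinesKeep rest2
    else
      match pySplitlinesKeep rest with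
      | [] => [[c]]
      | l :: ls => (c :: l) :: ls
termination_by l => l.length
decreasing_by all_goals (simp_all; try omega)

-- ===== PORT A =====
-- loop body of A's for-loop: state is (result, skip_next)
def aStep (marker : List Char) (st : List (List Char) × Bool) (line : List Char) :
    List (List Char) × Bool :=
  if st.2 then (st.1, false)
  else if PySem.Chars.isIn marker line then (st.1, true)
  else (st.1 ++ [line], false)

def strip_harness_frames_py (stderr : String) (harness_path : String) : String :=
  let marker := "File \"".toList ++ harness_path.toList ++ ['"']
  let lines := pySplitlinesKeep stderr.toList
  let res := lines.foldl (aStep marker) ([], false)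
  PySem.Str.join "" (res.1.map String.ofList)

-- ===== PORT B =====
-- B's while-loop: state is (out, lines); `idx = next(...)` is findIdx?; a hit splices
-- lines[:idx] onto out and continues with lines[idx+2:], a miss flushes and returns.
def bLoop (marker : List Char) (out : List (List Char)) (lines : List (List Char)) :
    List (List Char) :=
  match h : lines.findIdx? (fun l => PySem.Chars.isIn marker l) with
  | none => out ++ lines
  | some i => bLoop marker (out ++ lines.take i) (lines.drop (i + 2))
termination_by lines.length
decreasing_by
  have hi : i < lines.length := (List.findIdx?_eq_some_iff_getElem.mp h).1
  simp; omega

def strip_harness_frames_py_alt (stderr : String) (harness_path : String) : String :=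
  let marker := "File \"".toList ++ harness_path.toList ++ ['"']
  let lines := pySplitlinesKeep stderr.toList
  PySem.Str.join "" ((bLoop marker [] lines).map String.ofList)

-- ===== PRECONDITION & SPEC =====
def Spec_strip_harness_frames_py (stderr : String) (harness_path : String) (out : String) : Prop := out = strip_harness_frames_py_alt stderr harness_path
instance (stderr : String) (harness_path : String) (out : String) : Decidable (Spec_strip_harness_frames_py stderr harness_path out) := by unfold Spec_strip_harness_frames_py; infer_instance

-- ===== CLAIM (what is proved, stated in full; the proofs are below) =====
def Claim_equal_strip_harness_frames_py : Prop := ∀ (stderr : String) (harness_path : String), Dom_strip_harness_frames_py stderr harness_path → Spec_strip_harness_frames_py stderr harness_path (strip_harness_frames_py stderr harness_path)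

-- ===== LEMMAS AND PROOFS =====

-- Proof-only intermediate form: the common recursion both loops compute.
def bScan (marker : List Char) : List (List Char) → List (List Char)
  | [] => []
  | l :: rest =>
    if PySem.Chars.isIn marker l then bScan marker (rest.drop 1)
    else l :: bScan marker rest
termination_by ls => ls.length
decreasing_by all_goals (simp; try omega)

theorem foldl_aStep_eq (marker : List Char) :
    ∀ (lines : List (List Char)) (acc : List (List Char)),
      (lines.foldl (aStep marker) (acc, false)).1 = acc ++ bScan marker lines := by
  intro lines
  induction lines using bScan.induct marker with
  | case1 => intro acc; simp [bScan]
  | case2 l rest hIn ih =>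
      intro acc
      cases rest with
      | nil => simp [aStep, hIn, bScan]
      | cons r rest' =>
          rw [List.foldl_cons, List.foldl_cons,
            show aStep marker (acc, false) l = (acc, true) from by simp [aStep, hIn],
            show aStep marker (acc, true) r = (acc, false) from by simp [aStep],
            show bScan marker (l :: r :: rest') = bScan marker rest' from by simp [bScan, hIn]]
          simpa using ih acc
  | case3 l rest hIn ih =>
      intro acc
      have hstep : aStep marker (acc, false) l = (acc ++ [l], false) := by simp [aStep, hIn]
      simp only [List.foldl_cons, hstep]
      rw [ih (acc ++ [l])]
      simp [bScan, hIn]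

theorem bScan_findIdx (marker : List Char) :
    ∀ lines : List (List Char),
      bScan marker lines =
        match lines.findIdx? (fun l => PySem.Chars.isIn marker l) with
        | none => lines
        | some i => lines.take i ++ bScan marker (lines.drop (i + 2)) := by
  intro lines
  induction lines with
  | nil => simp [bScan]
  | cons l rest ih =>
      by_cases hIn : PySem.Chars.isIn marker l
      · simp [bScan, hIn, List.findIdx?_cons]
      · rw [show bScan marker (l :: rest) = l :: bScan marker rest from by simp [bScan, hIn]]
        rw [List.findIdx?_cons]
        simp only [hIn]
        rw [ih]
        cases hf : rest.findIdx? (fun l => PySem.Chars.isIn marker l) with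
        | none => simp
        | some i => simp [List.take_succ_cons, List.drop_succ_cons]

theorem bLoop_eq_bScan (marker : List Char) (out lines : List (List Char)) :
      bLoop marker out lines = out ++ bScan marker lines := by
  induction out, lines using bLoop.induct marker with
  | case1 out ls h => rw [bLoop, h, bScan_findIdx, h]
  | case2 out ls i h ih =>
      rw [bLoop, h, bScan_findIdx, h]
      simp only [ih, List.append_assoc]

-- ===== VERDICT (by name: the statement is the Claim_ definition above) =====
theorem strip_harness_frames_py_spec : Claim_equal_strip_harness_frames_py := by
  intro stderr harness_path _
  show strip_harness_frames_py stderr harness_path = strip_harness_frames_py_alt stderr harness_path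
  simp only [strip_harness_frames_py, strip_harness_frames_py_alt]
  rw [foldl_aStep_eq, bLoop_eq_bScan]
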